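-- pv_equiv track=rewrite | github.com/GabNavarro01/Curso-Completo-Python | Clase5/5.4.envido.py | envido
-- ===== SOURCE A (Python) =====
-- def convertir_valor(carta):
--     if carta[0] <= 7:
--         return carta[0]
--     else:
--         return 0
--
-- def envido(mano):
--     valores = [convertir_valor(carta) for carta in mano]
--     palos = [carta[1] for carta in mano]
--     mejor = max(valores)  # caso sin palos iguales
--
--     if palos[0] == palos[1]:
--         mejor = max(mejor, valores[0] + valores[1] + 20)
--
--     if palos[0] == palos[2]:
--         mejor = max(mejor, valores[0] + valores[2] + 20)
--
--     if palos[1] == palos[2]: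
--         mejor = max(mejor, valores[1] + valores[2] + 20)
--
--     return mejor
-- ===== SOURCE B (Python) =====
-- def envido(mano):
--     grupos = {}
--     for num, palo in mano[:3]:
--         grupos.setdefault(palo, []).append(num if num <= 7 else 0)
--     mejor = max(num if num <= 7 else 0 for num, _ in mano)
--     for vals in grupos.values():
--         if len(vals) == 2:
--             mejor = max(mejor, vals[0] + vals[1] + 20)
--         elif len(vals) == 3:
--             mejor = max(mejor, sum(vals) - min(vals) + 20)
--     return mejor
-- ===== Notes on version B (the rewrite author's own statement) =====
-- stated objective: alternative
-- what changed: B replaces A's three hard-coded pairwise suit comparisons by a suit-indexed grouping dict over the first three cards, scoring each suit group once (two-card group: sum+20; three-card group: sum minus smallest +20).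
import Mathlib
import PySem

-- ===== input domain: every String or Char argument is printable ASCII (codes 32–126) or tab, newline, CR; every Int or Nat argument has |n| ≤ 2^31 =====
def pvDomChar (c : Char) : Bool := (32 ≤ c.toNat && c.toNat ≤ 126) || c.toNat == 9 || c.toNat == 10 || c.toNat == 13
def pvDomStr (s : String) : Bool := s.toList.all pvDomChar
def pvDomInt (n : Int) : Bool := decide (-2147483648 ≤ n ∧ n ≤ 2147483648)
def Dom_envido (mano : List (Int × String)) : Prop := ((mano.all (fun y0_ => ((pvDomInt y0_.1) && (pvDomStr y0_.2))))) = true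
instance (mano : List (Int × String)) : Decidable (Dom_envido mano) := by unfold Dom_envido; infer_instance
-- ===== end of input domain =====

-- B groups the first three cards by suit in a dict and scores each suit group once,
-- instead of A's three unrolled pairwise suit comparisons (objective: alternative; return value only).

-- ===== PORT A =====
def convertir_valor (carta : Int × String) : Int :=
  if carta.1 ≤ 7 then carta.1 else 0

def envido (mano : List (Int × String)) : Int :=
  let valores := mano.map convertir_valor
  let palos := mano.map (fun carta => carta.2)
  let mejor := (PySem.List.max? valores (fun x => x)).getD 0
  let mejor := if PySem.List.pyGetD palos 0 "" = PySem.List.pyGetD palos 1 "" then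
      max mejor (PySem.List.pyGetD valores 0 0 + PySem.List.pyGetD valores 1 0 + 20) else mejor
  let mejor := if PySem.List.pyGetD palos 0 "" = PySem.List.pyGetD palos 2 "" then
      max mejor (PySem.List.pyGetD valores 0 0 + PySem.List.pyGetD valores 2 0 + 20) else mejor
  let mejor := if PySem.List.pyGetD palos 1 "" = PySem.List.pyGetD palos 2 "" then
      max mejor (PySem.List.pyGetD valores 1 0 + PySem.List.pyGetD valores 2 0 + 20) else mejor
  mejor

-- ===== PORT B =====
def envido_alt (mano : List (Int × String)) : Int :=
  let grupos : PySem.Dict String (List Int) :=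
    (PySem.List.slice mano none (some 3)).foldl
      (fun d c => d.modify c.2 [] (fun l => l ++ [if c.1 ≤ 7 then c.1 else 0]))
      PySem.Dict.empty
  let mejor := (PySem.List.max? (mano.map (fun c => if c.1 ≤ 7 then c.1 else 0)) (fun x => x)).getD 0
  grupos.values.foldl
    (fun mejor vals =>
      if vals.length = 2 then max mejor (vals[0]?.getD 0 + vals[1]?.getD 0 + 20)
      else if vals.length = 3 then max mejor (vals.sum - ((PySem.List.min? vals (fun x => x)).getD 0) + 20)
      else mejor)
    mejor

-- ===== PRECONDITION & SPEC =====
-- A indexes palos[0..2] and takes max(valores): it raises (IndexError/ValueError) unless the hand has ≥ 3 cards.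
def Pre_envido (mano : List (Int × String)) : Prop := 3 ≤ mano.length
instance (mano : List (Int × String)) : Decidable (Pre_envido mano) := by unfold Pre_envido; infer_instance
def pvWitness_envido : (List (Int × String)) := [(7, "o"), (6, "o"), (2, "e")]

def Spec_envido (mano : List (Int × String)) (out : Int) : Prop := out = envido_alt mano
instance (mano : List (Int × String)) (out : Int) : Decidable (Spec_envido mano out) := by unfold Spec_envido; infer_instance

-- ===== CLAIM (what is proved, stated in full; the proofs are below) =====
def Claim_equal_envido : Prop := ∀ (mano : List (Int × String)), Dom_envido mano → Pre_envido mano → Spec_envido mano (envido mano)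

-- ===== LEMMAS AND PROOFS =====
set_option maxHeartbeats 1000000 in
theorem envido_cons_eq (a b c : Int × String) (rest : List (Int × String)) :
    envido (a :: b :: c :: rest) = envido_alt (a :: b :: c :: rest) := by
  unfold envido envido_alt
  have hslice : PySem.List.slice (a::b::c::rest) none (some 3) = [a,b,c] := by
    simp [pysem, PySem.List.slice_to]
  rw [hslice]
  have hmap : List.map convertir_valor rest
      = List.map (fun c : Int × String => if c.1 ≤ 7 then c.1 else 0) rest := rfl
  simp only [pysem, List.map_cons, List.foldl_cons, List.foldl_nil, convertir_valor, hmap,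
    Option.getD_some, List.getD_cons_zero, List.getD_cons_succ]
  generalize (if a.1 ≤ 7 then a.1 else 0) = va
  generalize (if b.1 ≤ 7 then b.1 else 0) = vb
  generalize (if c.1 ≤ 7 then c.1 else 0) = vc
  generalize List.foldl max (max (max va vb) vc) (List.map (fun c : Int × String => if c.1 ≤ 7 then c.1 else 0) rest) = m
  by_cases h1 : b.2 = a.2 <;> by_cases h2 : c.2 = a.2 <;> by_cases h3 : c.2 = b.2
  · simp [h1, h2, h3, PySem.Dict.modify, PySem.Dict.empty, PySem.Dict.getD,
      PySem.Dict.get?, PySem.Dict.insert, PySem.List.min?_id_cons]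
    omega
  · exact absurd (h2.trans h1.symm) h3
  · exact absurd (h3.trans h1) h2
  · have h2' : ¬ (a.2 = c.2) := fun h => h2 h.symm
    have h3' : ¬ (b.2 = c.2) := fun h => h3 h.symm
    simp [h1, h2, h3, PySem.Dict.modify, PySem.Dict.empty, PySem.Dict.getD,
      PySem.Dict.get?, PySem.Dict.insert, PySem.List.min?_id_cons, h2', h3']
    try omega
  · exact absurd (h3.symm.trans h2) h1
  · have h1' : ¬ (a.2 = b.2) := fun h => h1 h.symm
    have h3' : ¬ (b.2 = c.2) := fun h => h3 h.symm
    simp [h1, h2, h3, PySem.Dict.modify, PySem.Dict.empty, PySem.Dict.getD,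
      PySem.Dict.get?, PySem.Dict.insert, PySem.List.min?_id_cons, h1', h3']
    try omega
  · have h1' : ¬ (a.2 = b.2) := fun h => h1 h.symm
    have h2' : ¬ (a.2 = c.2) := fun h => h2 h.symm
    simp [h1, h2, h3, PySem.Dict.modify, PySem.Dict.empty, PySem.Dict.getD,
      PySem.Dict.get?, PySem.Dict.insert, PySem.List.min?_id_cons, h1', h2']
    try omega
  · have h1' : ¬ (a.2 = b.2) := fun h => h1 h.symm
    have h2' : ¬ (a.2 = c.2) := fun h => h2 h.symm
    have h3' : ¬ (b.2 = c.2) := fun h => h3 h.symm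
    simp [h1, h2, h3, PySem.Dict.modify, PySem.Dict.empty, PySem.Dict.getD,
      PySem.Dict.get?, PySem.Dict.insert, PySem.List.min?_id_cons, h1', h2', h3']
    try omega

-- ===== VERDICT (by name: the statement is the Claim_ definition above) =====
theorem envido_spec : Claim_equal_envido := by
  intro mano hdom hpre
  match mano with
  | [] => simp [Pre_envido] at hpre
  | [_] => simp [Pre_envido] at hpre
  | [_, _] => simp [Pre_envido] at hpre
  | a :: b :: c :: rest =>
    unfold Spec_envido
    exact envido_cons_eq a b c rest
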